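-- pv_equiv track=rewrite | github.com/yaelGraz/Video-editor | utils/helpers.py | clean_text_for_voiceover
-- ===== SOURCE A (Python) =====
-- def clean_text_for_voiceover(text):
--     """
--     Clean text before sending to voiceover.
--     Removes accidental word repetitions.
--     """
--     if not text:
--         return text
--
--     words = text.split()
--     if len(words) < 2:
--         return text
--
--     cleaned_words = [words[0]]
--
--     for i in range(1, len(words)):
--         if words[i].lower() != words[i-1].lower():
--             cleaned_words.append(words[i])
--
--     result = ' '.join(cleaned_words)
--
--     # Remove repeated 2-word phrases
--     words = result.split()
--     if len(words) >= 4: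
--         i = 0
--         final_words = []
--         while i < len(words):
--             if i >= 2 and i + 1 < len(words):
--                 prev_phrase = ' '.join(words[i-2:i]).lower()
--                 curr_phrase = ' '.join(words[i:i+2]).lower()
--                 if prev_phrase == curr_phrase:
--                     i += 2
--                     continue
--             final_words.append(words[i])
--             i += 1
--         result = ' '.join(final_words)
--
--     return result
-- ===== SOURCE B (Python) =====
-- def clean_text_for_voiceover(text):
--     """
--     Clean text before sending to voiceover.
--     Removes accidental word repetitions.
--     """
--     if not text:
--         return text
--
--     words = text.split()
--     if len(words) < 2:
--         return text
--
--     # Phase 1: keep the first word of each maximal run of case-insensitively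
--     # equal consecutive words (run grouping, not pairwise comparison).
--     kept = []
--     i = 0
--     n = len(words)
--     while i < n:
--         kept.append(words[i])
--         key = words[i].lower()
--         i += 1
--         while i < n and words[i].lower() == key:
--             i += 1
--
--     # Phase 2: precompute, for every position, a flag saying whether the
--     # 2-word phrase starting there repeats the phrase two positions earlier,
--     # then run one linear automaton pass over (word, flag) pairs: a word is
--     # emitted unless its position starts or continues a flagged repeat.
--     n = len(kept)
--     if n >= 4:
--         low = [w.lower() for w in kept]
--         big = list(zip(low, low[1:]))
--         flags = [False, False] + [a == b for a, b in zip(big, big[2:])] + [False]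
--         out = []
--         prev = False
--         for w, flag in zip(kept, flags):
--             take = flag and not prev
--             if not (take or prev):
--                 out.append(w)
--             prev = take
--         kept = out
--
--     return ' '.join(kept)
-- ===== Notes on version B (the rewrite author's own statement) =====
-- stated objective: alternative
-- what changed: Phase 1 becomes run grouping (keep the first word of each maximal case-insensitive run, nested scan) instead of pairwise predecessor comparison; the join/re-split between phases is removed; phase 2 replaces the index while-loop with its i+=2 skip and window re-slicing by precomputing a per-position bigram-repeat flag array via zips and then running a single linear automaton pass over (word, flag) pairs with one boolean state.
import Mathlib
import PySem

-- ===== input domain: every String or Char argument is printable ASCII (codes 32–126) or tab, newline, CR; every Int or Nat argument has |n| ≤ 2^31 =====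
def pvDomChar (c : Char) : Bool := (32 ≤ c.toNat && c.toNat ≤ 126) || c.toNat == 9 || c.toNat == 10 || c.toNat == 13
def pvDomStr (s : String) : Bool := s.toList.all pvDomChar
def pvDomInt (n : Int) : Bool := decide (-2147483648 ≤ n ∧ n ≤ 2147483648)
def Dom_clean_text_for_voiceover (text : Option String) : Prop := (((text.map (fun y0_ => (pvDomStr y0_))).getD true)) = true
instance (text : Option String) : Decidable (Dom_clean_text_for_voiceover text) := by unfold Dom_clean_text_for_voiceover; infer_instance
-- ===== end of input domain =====

-- B restructures A: phase 1 groups maximal case-insensitive runs instead of pairwise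
-- predecessor comparison, the join/re-split between phases is removed, and phase 2
-- precomputes per-position bigram-repeat flags via zips and runs one linear automaton
-- pass with a single boolean state instead of A's index while-loop with i+=2 skips.

-- ===== PORT A =====

-- ' '.join(words[i-2:i]).lower() == ' '.join(words[i:i+2]).lower()
def aMatch (ws : List String) (i : Int) : Bool :=
  PySem.Str.lower (PySem.Str.join " " (PySem.List.slice ws (some (i - 2)) (some i))) ==
  PySem.Str.lower (PySem.Str.join " " (PySem.List.slice ws (some i) (some (i + 2))))

-- the while-loop of A's phase 2 (final_words built by structural recursion)
def aLoop (ws : List String) (i : Int) : List String :=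
  if _h : i < (ws.length : Int) then
    if 2 ≤ i ∧ i + 1 < (ws.length : Int) ∧ aMatch ws i then
      aLoop ws (i + 2)
    else
      PySem.List.pyGetD ws i "" :: aLoop ws (i + 1)
  else []
termination_by ((ws.length : Int) - i).toNat
decreasing_by all_goals omega

def clean_text_for_voiceover (text : Option String) : Option String :=
  match text with
  | none => none
  | some t =>
    if t = "" then some t
    else
      let words := PySem.Str.split₀ t
      if words.length < 2 then some t
      else
        let cleaned := (PySem.List.pyRange 1 (words.length : Int)).foldl
          (fun acc i =>
            if PySem.Str.lower (PySem.List.pyGetD words i "") ≠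
               PySem.Str.lower (PySem.List.pyGetD words (i - 1) "") then
              acc ++ [PySem.List.pyGetD words i ""]
            else acc)
          [PySem.List.pyGetD words 0 ""]
        let result := PySem.Str.join " " cleaned
        let words2 := PySem.Str.split₀ result
        let result2 := if 4 ≤ words2.length then PySem.Str.join " " (aLoop words2 0) else result
        some result2

-- ===== PORT B =====

-- phase 1: keep the first word of each maximal case-insensitive run
def runsFirst (ws : List String) : List String :=
  match ws with
  | [] => []
  | w :: rest =>
      w :: runsFirst (rest.dropWhile (fun x => PySem.Str.lower x == PySem.Str.lower w))
termination_by ws.length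
decreasing_by
  simp only [List.length_cons]
  have := List.length_dropWhile_le (fun x => PySem.Str.lower x == PySem.Str.lower w) rest
  omega

-- flags = [False, False] + [a == b for a, b in zip(big, big[2:])] + [False]
def flagsOf (kept : List String) : List Bool :=
  let low := kept.map PySem.Str.lower
  let big := low.zip (low.drop 1)
  [false, false] ++ (big.zip (big.drop 2)).map (fun p => p.1 == p.2) ++ [false]

def clean_text_for_voiceover_alt (text : Option String) : Option String :=
  match text with
  | none => none
  | some t =>
    if t = "" then some t
    else
      let words := PySem.Str.split₀ t
      if words.length < 2 then some t
      else
        let kept := runsFirst words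
        let kept2 :=
          if 4 ≤ kept.length then
            ((kept.zip (flagsOf kept)).foldl
              (fun (st : List String × Bool) wf =>
                let take := wf.2 && !st.2
                (if !(take || st.2) then st.1 ++ [wf.1] else st.1, take))
              ([], false)).1
          else kept
        some (PySem.Str.join " " kept2)

-- ===== PRECONDITION & SPEC =====
def Spec_clean_text_for_voiceover (text : Option String) (out : Option String) : Prop := out = clean_text_for_voiceover_alt text
instance (text : Option String) (out : Option String) : Decidable (Spec_clean_text_for_voiceover text out) := by unfold Spec_clean_text_for_voiceover; infer_instance

-- ===== CLAIM (what is proved, stated in full; the proofs are below) =====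
def Claim_equal_clean_text_for_voiceover : Prop := ∀ (text : Option String), Dom_clean_text_for_voiceover text → Spec_clean_text_for_voiceover text (clean_text_for_voiceover text)

-- ===== LEMMAS AND PROOFS =====

-- a word produced by str.split(): nonempty and whitespace-free
def GoodWord (w : String) : Prop :=
  w.toList ≠ [] ∧ ∀ c ∈ w.toList, PySem.Chars.isspace c = false

theorem split₀_go_good (s cur : List Char) (acc : List (List Char))
    (hcur : ∀ c ∈ cur, PySem.Chars.isspace c = false)
    (hacc : ∀ w ∈ acc, w ≠ [] ∧ ∀ c ∈ w, PySem.Chars.isspace c = false) :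
    ∀ w ∈ PySem.Chars.split₀.go s cur acc, w ≠ [] ∧ ∀ c ∈ w, PySem.Chars.isspace c = false := by
  induction s generalizing cur acc with
  | nil =>
    intro w hw
    unfold PySem.Chars.split₀.go at hw
    split at hw
    · exact hacc _ (List.mem_reverse.mp hw)
    · rcases List.mem_cons.mp (List.mem_reverse.mp hw) with h | h
      · next hne =>
        subst h
        constructor
        · simp only [ne_eq, List.reverse_eq_nil_iff]
          exact fun hc => by simp [hc] at hne
        · intro c hc
          exact hcur _ (List.mem_reverse.mp hc)
      · exact hacc _ h
  | cons c rest ih =>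
    intro w hw
    unfold PySem.Chars.split₀.go at hw
    split at hw
    · split at hw
      · exact ih _ _ (by simp) hacc _ hw
      · next hne =>
        refine ih _ _ (by simp) ?_ _ hw
        intro w' hw'
        rcases List.mem_cons.mp hw' with h | h
        · subst h
          constructor
          · simp only [ne_eq, List.reverse_eq_nil_iff]
            exact fun hc => by simp [hc] at hne
          · intro c' hc'
            exact hcur _ (List.mem_reverse.mp hc')
        · exact hacc _ h
    · next hns =>
      refine ih _ _ ?_ hacc _ hw
      intro c' hc'
      rcases List.mem_cons.mp hc' with h | h
      · subst h; simpa using hns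
      · exact hcur _ h

theorem split₀_good (t : String) : ∀ w ∈ PySem.Str.split₀ t, GoodWord w := by
  intro w hw
  have h1 : w.toList ∈ PySem.Chars.split₀ t.toList := by
    rw [← PySem.Str.split₀_map_toList]
    exact List.mem_map_of_mem hw
  exact split₀_go_good t.toList [] [] (by simp) (by simp) _ h1

theorem split₀_go_word (w rest cur : List Char) (acc : List (List Char))
    (hw : ∀ c ∈ w, PySem.Chars.isspace c = false) :
    PySem.Chars.split₀.go (w ++ rest) cur acc = PySem.Chars.split₀.go rest (w.reverse ++ cur) acc := by
  induction w generalizing cur with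
  | nil => simp
  | cons c cs ih =>
    have step : PySem.Chars.split₀.go ((c :: cs) ++ rest) cur acc
        = PySem.Chars.split₀.go (cs ++ rest) (c :: cur) acc := by
      conv_lhs => rw [List.cons_append, PySem.Chars.split₀.go]
      rw [if_neg (by simpa using hw c (by simp))]
    rw [step, ih _ (fun c' hc' => hw c' (by simp [hc']))]
    simp

theorem split₀_go_join (ws : List (List Char)) (acc : List (List Char))
    (h : ∀ w ∈ ws, w ≠ [] ∧ ∀ c ∈ w, PySem.Chars.isspace c = false) :
    PySem.Chars.split₀.go (PySem.Chars.join [' '] ws) [] acc = acc.reverse ++ ws := by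
  induction ws generalizing acc with
  | nil => simp [PySem.Chars.join_nil, PySem.Chars.split₀.go]
  | cons w ws ih =>
    match ws with
    | [] =>
      have hw := h w (by simp)
      rw [PySem.Chars.join_singleton, show PySem.Chars.split₀.go w [] acc
          = PySem.Chars.split₀.go (w ++ []) [] acc by rw [List.append_nil],
        split₀_go_word _ _ _ _ hw.2]
      conv_lhs => rw [PySem.Chars.split₀.go]
      rw [if_neg (by simpa using hw.1)]
      simp
    | w' :: ws' =>
      have hw := h w (by simp)
      rw [PySem.Chars.join_cons_cons, List.append_assoc, split₀_go_word _ _ _ _ hw.2, List.singleton_append]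
      conv_lhs => rw [PySem.Chars.split₀.go]
      rw [if_pos (by simp [PySem.Chars.isspace])]
      rw [if_neg (by simpa using hw.1)]
      rw [ih _ (fun v hv => h v (by simp [hv]))]
      simp

theorem split₀_join (ws : List String) (h : ∀ w ∈ ws, GoodWord w) :
    PySem.Str.split₀ (PySem.Str.join " " ws) = ws := by
  have htl : (PySem.Str.join " " ws).toList = PySem.Chars.join [' '] (ws.map String.toList) := by
    rw [PySem.Str.toList_join]; rfl
  have key : List.map String.toList (PySem.Str.split₀ (PySem.Str.join " " ws)) = List.map String.toList ws := by
    rw [PySem.Str.split₀_map_toList, htl,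
      show PySem.Chars.split₀ (PySem.Chars.join [' '] (ws.map String.toList))
        = PySem.Chars.split₀.go (PySem.Chars.join [' '] (ws.map String.toList)) [] [] from rfl,
      split₀_go_join _ _ (by
        intro w hw
        rcases List.mem_map.mp hw with ⟨v, hv, rfl⟩
        exact (h v hv))]
    simp
  exact List.map_injective_iff.mpr (fun a b hab => String.toList_inj.mp hab) key

theorem lowerChar_not_space (c : Char) (h : PySem.Chars.isspace c = false) :
    PySem.Chars.lowerChar c ≠ ' ' := by
  unfold PySem.Chars.lowerChar
  split
  · next hu =>
    unfold PySem.Chars.isupper at hu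
    simp only [Bool.and_eq_true, decide_eq_true_eq] at hu
    intro hc
    have h2 : 65 ≤ c.toNat := hu.1
    have h3 : c.toNat ≤ 90 := hu.2
    have hval : (Char.ofNat (c.toNat + 32)).toNat = c.toNat + 32 := by
      rw [Char.ofNat, dif_pos (by constructor; omega)]
      rfl
    rw [hc] at hval
    have : (' ' : Char).toNat = 32 := by decide
    omega
  · intro hc
    subst hc
    simp [PySem.Chars.isspace] at h

theorem append_space_inj (x y u v : List Char) (hx : ' ' ∉ x) (hu : ' ' ∉ u) :
    (x ++ ' ' :: y = u ++ ' ' :: v) ↔ (x = u ∧ y = v) := by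
  constructor
  · intro h
    induction x generalizing u with
    | nil =>
      match u with
      | [] => simpa using h
      | c :: u' =>
        simp only [List.nil_append, List.cons_append, List.cons.injEq] at h
        exact absurd (h.1 ▸ List.mem_cons_self ..) hu
    | cons c x' ih =>
      match u with
      | [] =>
        simp only [List.cons_append, List.nil_append, List.cons.injEq] at h
        exact absurd (h.1.symm ▸ List.mem_cons_self ..) hx
      | c' :: u' =>
        simp only [List.cons_append, List.cons.injEq] at h
        obtain ⟨rfl, h2⟩ := h
        have := ih u' (fun hm => hx (List.mem_cons_of_mem _ hm))
          (fun hm => hu (List.mem_cons_of_mem _ hm)) h2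
        simp [this.1, this.2]
  · rintro ⟨rfl, rfl⟩; rfl

theorem no_space_map_lower (a : String) (ha : GoodWord a) :
    ' ' ∉ List.map PySem.Chars.lowerChar a.toList := by
  intro hm
  rcases List.mem_map.mp hm with ⟨c, hc, hlc⟩
  exact lowerChar_not_space c (ha.2 c hc) hlc

theorem lower_join_pair (a b : String) :
    (PySem.Str.lower (PySem.Str.join " " [a, b])).toList =
      List.map PySem.Chars.lowerChar a.toList ++ ' ' :: List.map PySem.Chars.lowerChar b.toList := by
  rw [PySem.Str.toList_lower, PySem.Str.toList_join]
  show PySem.Chars.lower (PySem.Chars.join [' '] [a.toList, b.toList]) = _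
  rw [PySem.Chars.join_cons_cons, PySem.Chars.join_singleton]
  unfold PySem.Chars.lower
  rw [List.append_assoc, List.map_append, List.singleton_append]
  simp only [List.map_cons]
  rw [show PySem.Chars.lowerChar ' ' = ' ' from by decide]

theorem comp_lower (x y : String) :
    (List.map PySem.Chars.lowerChar x.toList = List.map PySem.Chars.lowerChar y.toList) ↔
      PySem.Str.lower x = PySem.Str.lower y := by
  rw [← String.toList_inj, PySem.Str.toList_lower, PySem.Str.toList_lower]
  rfl

theorem pair_eq_of_join (a b c d : String)
    (ha : GoodWord a) (hc : GoodWord c) :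
    (PySem.Str.lower (PySem.Str.join " " [a, b]) = PySem.Str.lower (PySem.Str.join " " [c, d]))
      ↔ (PySem.Str.lower a = PySem.Str.lower c ∧ PySem.Str.lower b = PySem.Str.lower d) := by
  rw [← String.toList_inj, lower_join_pair, lower_join_pair,
    append_space_inj _ _ _ _ (no_space_map_lower a ha) (no_space_map_lower c hc),
    comp_lower, comp_lower]

theorem pairs_map (ws : List String) :
    (PySem.List.pyRange 1 (ws.length : Int)).map
      (fun i => (PySem.List.pyGetD ws (i - 1) "", PySem.List.pyGetD ws i "")) = ws.zip (ws.drop 1) := by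
  apply List.ext_getElem
  · simp [PySem.List.length_pyRange_one]
  · intro k h1 h2
    have hk : k + 1 < ws.length := by
      simp at h2
      omega
    rw [List.getElem_map, PySem.List.getElem_pyRange_one, List.getElem_zip, List.getElem_drop]
    rw [Prod.mk.injEq]
    constructor
    · rw [show (1 : Int) + (k : Int) - 1 = ((k : Nat) : Int) by omega, PySem.List.pyGetD_natCast,
        List.getD_eq_getElem?_getD, List.getElem?_eq_getElem (by omega)]
      rfl
    · rw [show (1 : Int) + (k : Int) = ((1 + k : Nat) : Int) by omega, PySem.List.pyGetD_natCast,
        List.getD_eq_getElem?_getD, List.getElem?_eq_getElem (by omega)]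
      rfl

theorem phase1_eq (ws : List String) :
    (PySem.List.pyRange 1 (ws.length : Int)).foldl
      (fun acc i =>
        if PySem.Str.lower (PySem.List.pyGetD ws i "") ≠
           PySem.Str.lower (PySem.List.pyGetD ws (i - 1) "") then
          acc ++ [PySem.List.pyGetD ws i ""]
        else acc)
      [PySem.List.pyGetD ws 0 ""] =
    PySem.List.pyGetD ws 0 "" ::
      ((ws.zip (ws.drop 1)).filter
        (fun p => PySem.Str.lower p.2 ≠ PySem.Str.lower p.1)).map (·.2) := by
  have step : (PySem.List.pyRange 1 (ws.length : Int)).foldl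
      (fun acc i =>
        if PySem.Str.lower (PySem.List.pyGetD ws i "") ≠
           PySem.Str.lower (PySem.List.pyGetD ws (i - 1) "") then
          acc ++ [PySem.List.pyGetD ws i ""]
        else acc)
      [PySem.List.pyGetD ws 0 ""]
      = ((PySem.List.pyRange 1 (ws.length : Int)).map
          (fun i => (PySem.List.pyGetD ws (i - 1) "", PySem.List.pyGetD ws i ""))).foldl
        (fun acc p => if PySem.Str.lower p.2 ≠ PySem.Str.lower p.1 then acc ++ [p.2] else acc)
        [PySem.List.pyGetD ws 0 ""] := by
    rw [List.foldl_map]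
  rw [step, pairs_map]
  have := PySem.List.foldl_append_if
    (fun (p : String × String) => decide (PySem.Str.lower p.2 ≠ PySem.Str.lower p.1))
    (fun (p : String × String) => p.2)
    (ws.zip (ws.drop 1)) [PySem.List.pyGetD ws 0 ""]
  simp only [decide_eq_true_eq] at this
  rw [this, List.singleton_append]

-- phase 1: run grouping equals the adjacent-pair filter
theorem runs_pairs : ∀ (n : Nat) (rest : List String), rest.length ≤ n → ∀ w : String,
    runsFirst (w :: rest) = w ::
      (((w :: rest).zip rest).filter
        (fun p => PySem.Str.lower p.2 ≠ PySem.Str.lower p.1)).map (·.2) := by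
  intro n
  induction n with
  | zero =>
    intro rest hr w
    match rest, hr with
    | [], _ => rw [runsFirst]; simp [runsFirst]
  | succ n ih =>
    intro rest hr w
    match rest with
    | [] => rw [runsFirst]; simp [runsFirst]
    | x :: xs =>
      have hxs : xs.length ≤ n := by simpa using hr
      have h1 := ih xs hxs x
      rw [runsFirst] at h1
      simp only [List.cons.injEq, true_and] at h1
      by_cases h : PySem.Str.lower x = PySem.Str.lower w
      · have hdw : List.dropWhile (fun y => PySem.Str.lower y == PySem.Str.lower w) (x :: xs)
            = List.dropWhile (fun y => PySem.Str.lower y == PySem.Str.lower x) xs := by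
          rw [List.dropWhile_cons_of_pos (by simp [h])]
          congr 1
          funext y
          rw [h]
        rw [runsFirst, hdw, h1]
        simp [List.zip_cons_cons, h]
      · have hdw : List.dropWhile (fun y => PySem.Str.lower y == PySem.Str.lower w) (x :: xs)
            = x :: xs := by
          rw [List.dropWhile_cons_of_neg (by simp [h])]
        rw [runsFirst, hdw, runsFirst, h1]
        simp [List.zip_cons_cons, h]

-- B's automaton pass, as a recursion on the (word, flag) list
def bGo : List (String × Bool) → Bool → List String
  | [], _ => []
  | wf :: rest, prev =>
      (if wf.2 && !prev || prev then [] else [wf.1]) ++ bGo rest (wf.2 && !prev)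

theorem bFold (l : List (String × Bool)) : ∀ (acc : List String) (prev : Bool),
    (l.foldl (fun (st : List String × Bool) wf =>
       let take := wf.2 && !st.2
       (if !(take || st.2) then st.1 ++ [wf.1] else st.1, take)) (acc, prev)).1
    = acc ++ bGo l prev := by
  induction l with
  | nil => intro acc prev; simp [bGo]
  | cons wf rest ih =>
    intro acc prev
    simp only [List.foldl_cons, bGo]
    rw [ih]
    cases hc : (wf.2 && !prev || prev) <;> simp

theorem flagsOf_length (kept : List String) (h : 4 ≤ kept.length) :
    (flagsOf kept).length = kept.length := by
  simp [flagsOf]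
  omega

theorem flagsOf_get (kept : List String) (h4 : 4 ≤ kept.length) (i : Nat) (hi : i < kept.length) :
    (flagsOf kept)[i]! =
      (decide (2 ≤ i) && decide (i + 1 < kept.length) &&
        ((PySem.Str.lower kept[i-2]!, PySem.Str.lower kept[i-1]!) ==
         (PySem.Str.lower kept[i]!, PySem.Str.lower kept[i+1]!))) := by
  have hflen := flagsOf_length kept h4
  rw [getElem!_pos (flagsOf kept) i (by omega)]
  have hX : flagsOf kept = false :: false ::
      ((((kept.map PySem.Str.lower).zip ((kept.map PySem.Str.lower).drop 1)).zip
        (((kept.map PySem.Str.lower).zip ((kept.map PySem.Str.lower).drop 1)).drop 2)).map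
        (fun p => p.1 == p.2) ++ [false]) := by
    simp [flagsOf]
  match i with
  | 0 => rw [List.getElem_of_eq hX (by omega)]; simp
  | 1 => rw [List.getElem_of_eq hX (by omega)]; simp
  | (j+2) =>
    have hXlen : ((((kept.map PySem.Str.lower).zip ((kept.map PySem.Str.lower).drop 1)).zip
        (((kept.map PySem.Str.lower).zip ((kept.map PySem.Str.lower).drop 1)).drop 2)).map
        (fun p => p.1 == p.2)).length = kept.length - 3 := by
      simp
      omega
    have step : (flagsOf kept)[j+2]'(by omega) =
        (((((kept.map PySem.Str.lower).zip ((kept.map PySem.Str.lower).drop 1)).zip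
          (((kept.map PySem.Str.lower).zip ((kept.map PySem.Str.lower).drop 1)).drop 2)).map
          (fun p => p.1 == p.2) ++ [false]))[j]'(by simp; omega) := by
      rw [List.getElem_of_eq hX (by omega)]
      simp
    rw [step]
    by_cases hj : j < kept.length - 3
    · rw [List.getElem_append_left (by rw [hXlen]; omega)]
      rw [List.getElem_map]
      rw [List.getElem_zip, List.getElem_drop, List.getElem_zip, List.getElem_drop,
        List.getElem_zip, List.getElem_drop]
      simp only [List.getElem_map]
      rw [getElem!_pos kept (j+2-2) (by omega), getElem!_pos kept (j+2-1) (by omega),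
        getElem!_pos kept (j+2) (by omega), getElem!_pos kept (j+2+1) (by omega)]
      have d1 : decide (2 ≤ j + 2) = true := by simp
      have d2 : decide (j + 2 + 1 < kept.length) = true := by simp; omega
      rw [d1, d2]
      simp only [Bool.true_and]
      rw [getElem_congr rfl (show 1 + j = j + 2 - 1 by omega) (by omega),
        getElem_congr rfl (show 2 + j = j + 2 by omega) (by omega),
        getElem_congr rfl (show 1 + (2 + j) = j + 2 + 1 by omega) (by omega),
        getElem_congr rfl (show (j : Nat) = j + 2 - 2 by omega) (by omega)]
    · have hieq : j = kept.length - 3 := by omega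
      rw [List.getElem_append_right (by rw [hXlen]; omega)]
      have d2 : decide (j + 2 + 1 < kept.length) = false := by simp; omega
      rw [d2]
      simp

theorem aMatch_eq_pair (ws : List String) (hg : ∀ w ∈ ws, GoodWord w) (k : Nat)
    (hk : k + 3 < ws.length) :
    aMatch ws ((k : Int) + 2) =
      ((PySem.Str.lower ws[k], PySem.Str.lower ws[k+1]) ==
       (PySem.Str.lower ws[k+2], PySem.Str.lower ws[k+3])) := by
  have e1 : PySem.List.slice ws (some ((k : Int) + 2 - 2)) (some ((k : Int) + 2))
      = [ws[k], ws[k+1]] := by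
    rw [show ((k : Int) + 2 - 2) = (k : Int) by omega,
      PySem.List.slice_of_nonneg ws (by omega) (by omega) (by omega) (by omega)]
    rw [show ((k : Int) + 2).toNat - ((k : Int)).toNat = 2 by omega, show ((k : Int)).toNat = k by omega]
    rw [List.drop_eq_getElem_cons (i := k) (by omega),
      List.drop_eq_getElem_cons (i := k+1) (by omega),
      List.take_succ_cons, List.take_succ_cons, List.take_zero]
  have e2 : PySem.List.slice ws (some ((k : Int) + 2)) (some ((k : Int) + 2 + 2))
      = [ws[k+2], ws[k+3]] := by
    rw [PySem.List.slice_of_nonneg ws (by omega) (by omega) (by omega) (by omega)]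
    rw [show ((k : Int) + 2 + 2).toNat - ((k : Int) + 2).toNat = 2 by omega,
      show ((k : Int) + 2).toNat = k + 2 by omega]
    rw [List.drop_eq_getElem_cons (i := k+2) (by omega),
      List.drop_eq_getElem_cons (i := k+3) (by omega),
      List.take_succ_cons, List.take_succ_cons, List.take_zero]
  unfold aMatch
  rw [e1, e2, Bool.eq_iff_iff, beq_iff_eq, beq_iff_eq,
    pair_eq_of_join _ _ _ _ (hg _ (List.getElem_mem _)) (hg _ (List.getElem_mem _)),
    Prod.mk.injEq]

theorem aLoop_eq_bGo (ws : List String) (flags : List Bool)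
    (hlen : flags.length = ws.length)
    (hflag : ∀ (i : Nat), i < ws.length →
      flags[i]! = (decide (2 ≤ i) && decide (i + 1 < ws.length) && aMatch ws (i : Int))) :
    ∀ (n i : Nat), ws.length - i ≤ n →
      aLoop ws (i : Int) = bGo ((ws.zip flags).drop i) false := by
  intro n
  induction n with
  | zero =>
    intro i h
    rw [aLoop, dif_neg (by omega),
      List.drop_eq_nil_of_le (by rw [List.length_zip, hlen]; omega)]
    rfl
  | succ n ih =>
    intro i h
    by_cases hi : i < ws.length
    · have hz : (ws.zip flags).drop i
          = (ws[i], flags[i]'(by omega)) :: (ws.zip flags).drop (i + 1) := by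
        rw [List.drop_eq_getElem_cons (by rw [List.length_zip, hlen]; omega)]
        congr 1
        exact List.getElem_zip ..
      rw [aLoop, dif_pos (by omega)]
      by_cases hc : 2 ≤ (i : Int) ∧ (i : Int) + 1 < (ws.length : Int) ∧ aMatch ws (i : Int)
      · rw [if_pos hc]
        have hi1 : i + 1 < ws.length := by
          have := hc.2.1
          omega
        have hfi : flags[i]'(by omega) = true := by
          rw [← getElem!_pos flags i (by omega), hflag i hi]
          have h2 : decide (2 ≤ i) = true := by
            have := hc.1
            simp
            omega
          have h3 : decide (i + 1 < ws.length) = true := by simp [hi1]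
          rw [h2, h3, hc.2.2]
          rfl
        have hz1 : (ws.zip flags).drop (i + 1)
            = (ws[i+1], flags[i+1]'(by omega)) :: (ws.zip flags).drop (i + 2) := by
          rw [List.drop_eq_getElem_cons (by rw [List.length_zip, hlen]; omega)]
          congr 1
          exact List.getElem_zip ..
        rw [hz, hz1]
        simp only [bGo, hfi]
        simp only [Bool.not_false, Bool.and_true, 
          Bool.not_true, Bool.and_false, Bool.false_or, if_true, List.nil_append]
        rw [show (i : Int) + 2 = ((i + 2 : Nat) : Int) by push_cast; ring]
        exact ih (i + 2) (by omega)
      · rw [if_neg hc]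
        have hfi : flags[i]'(by omega) = false := by
          rw [← getElem!_pos flags i (by omega), hflag i hi]
          by_cases h2 : 2 ≤ i
          · by_cases h3 : i + 1 < ws.length
            · have hm : aMatch ws (i : Int) = false := by
                cases hmm : aMatch ws (i : Int)
                · rfl
                · exact absurd ⟨by omega, by exact_mod_cast (by omega : (i:Int) + 1 < (ws.length : Int)), hmm⟩ hc
              simp [hm]
            · simp [h3]
          · simp [h2]
        rw [hz]
        simp only [bGo, hfi]
        simp only [Bool.false_and, Bool.or_false, Bool.not_false]
        congr 1
        · rw [PySem.List.pyGetD_natCast, List.getD_eq_getElem?_getD,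
            List.getElem?_eq_getElem hi]
          rfl
        · rw [show (i : Int) + 1 = ((i + 1 : Nat) : Int) by push_cast; ring]
          exact ih (i + 1) (by omega)
    · rw [aLoop, dif_neg (by omega),
        List.drop_eq_nil_of_le (by rw [List.length_zip, hlen]; omega)]
      rfl

-- ===== VERDICT (by name: the statement is the Claim_ definition above) =====
theorem clean_text_for_voiceover_spec : Claim_equal_clean_text_for_voiceover := by
  intro text _hdom
  unfold Spec_clean_text_for_voiceover
  match text with
  | none => rfl
  | some t =>
    show clean_text_for_voiceover (some t) = clean_text_for_voiceover_alt (some t)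
    simp only [clean_text_for_voiceover, clean_text_for_voiceover_alt]
    by_cases ht : t = ""
    · rw [if_pos ht, if_pos ht]
    · rw [if_neg ht, if_neg ht]
      by_cases hlen : (PySem.Str.split₀ t).length < 2
      · rw [if_pos hlen, if_pos hlen]
      · rw [if_neg hlen, if_neg hlen]
        have hgw : ∀ w ∈ PySem.Str.split₀ t, GoodWord w := split₀_good t
        obtain ⟨w, rest, hwr⟩ : ∃ w rest, PySem.Str.split₀ t = w :: rest := by
          match hh : PySem.Str.split₀ t with
          | [] => rw [hh] at hlen; simp at hlen
          | w :: rest => exact ⟨w, rest, rfl⟩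
        rw [hwr] at hgw
        rw [hwr, phase1_eq, runs_pairs rest.length rest le_rfl w]
        simp only [PySem.List.pyGetD_zero, List.getD_cons_zero, List.drop_succ_cons,
          List.drop_zero]
        set Z := w :: (((w :: rest).zip rest).filter
          (fun p => PySem.Str.lower p.2 ≠ PySem.Str.lower p.1)).map (·.2) with hZ
        have hZg : ∀ v ∈ Z, GoodWord v := by
          intro v hv
          rcases List.mem_cons.mp hv with rfl | hv
          · exact hgw v (List.mem_cons_self ..)
          · rcases List.mem_map.mp hv with ⟨q, hq, rfl⟩
            have hz2 := List.of_mem_zip (List.mem_of_mem_filter hq)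
            exact hgw _ (List.mem_cons_of_mem _ hz2.2)
        rw [split₀_join Z hZg]
        by_cases h4 : 4 ≤ Z.length
        · rw [if_pos h4, if_pos h4]
          congr 1
          have hflag' : ∀ (i : Nat), i < Z.length →
              (flagsOf Z)[i]! = (decide (2 ≤ i) && decide (i + 1 < Z.length) &&
                aMatch Z (i : Int)) := by
            intro i hi
            rw [flagsOf_get Z h4 i hi]
            by_cases h2 : 2 ≤ i
            · by_cases h3 : i + 1 < Z.length
              · have hk : i - 2 + 3 < Z.length := by omega
                have hm := aMatch_eq_pair Z hZg (i - 2) hk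
                rw [show ((i - 2 : Nat) : Int) + 2 = (i : Int) by omega] at hm
                rw [hm]
                rw [getElem!_pos Z (i - 2) (by omega), getElem!_pos Z (i - 1) (by omega),
                  getElem!_pos Z i (by omega), getElem!_pos Z (i + 1) (by omega)]
                rw [getElem_congr rfl (show i - 2 + 1 = i - 1 by omega) (by omega),
                  getElem_congr rfl (show i - 2 + 2 = i by omega) (by omega),
                  getElem_congr rfl (show i - 2 + 3 = i + 1 by omega) (by omega)]
              · simp [h3]
            · simp [h2]
          have hmain := aLoop_eq_bGo Z (flagsOf Z) (flagsOf_length Z h4) hflag' Z.length 0 (by omega)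
          rw [Nat.cast_zero] at hmain
          rw [hmain, List.drop_zero, bFold]
          rw [List.nil_append]
        · rw [if_neg h4, if_neg h4]
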